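-- pv_equiv track=rewrite | github.com/songzy12/HackerRank | Algorithms/Strings/medium/bear_and_steady_gene.py | compute_prefix_sum
-- ===== SOURCE A (Python) =====
-- def compute_prefix_sum(gene):
--     prefix_sum = {c: [0 for i in range(len(gene))] for c in "ATCG"}
--     for i in range(len(gene)):
--         for c in "ATCG":
--             prefix_sum[c][i] = (prefix_sum[c][i - 1] if i - 1 >= 0 else 0) + (
--                 1 if gene[i] == c else 0
--             )
--     return prefix_sum
-- ===== SOURCE B (Python) =====
-- def compute_prefix_sum(gene):
--     n = len(gene)
--     result = {}
--     for c in "ATCG":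
--         positions = [i for i, g in enumerate(gene) if g == c]
--         arr = []
--         prev = 0
--         for k, pos in enumerate(positions):
--             arr.extend([k] * (pos - prev))
--             prev = pos
--         arr.extend([len(positions)] * (n - prev))
--         result[c] = arr
--     return result
-- ===== Notes on version B (the rewrite author's own statement) =====
-- stated objective: alternative
-- what changed: Instead of A's per-index running-sum recurrence (outer loop over positions, inner over 'ATCG', each cell read from the previous dict cell), B first collects the occurrence positions of each character and then builds each prefix array by concatenating constant segments: the stretch between consecutive occurrences is filled with the occurrence rank, so no per-index counter update or previous-cell read happens.
import Mathlib
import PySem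

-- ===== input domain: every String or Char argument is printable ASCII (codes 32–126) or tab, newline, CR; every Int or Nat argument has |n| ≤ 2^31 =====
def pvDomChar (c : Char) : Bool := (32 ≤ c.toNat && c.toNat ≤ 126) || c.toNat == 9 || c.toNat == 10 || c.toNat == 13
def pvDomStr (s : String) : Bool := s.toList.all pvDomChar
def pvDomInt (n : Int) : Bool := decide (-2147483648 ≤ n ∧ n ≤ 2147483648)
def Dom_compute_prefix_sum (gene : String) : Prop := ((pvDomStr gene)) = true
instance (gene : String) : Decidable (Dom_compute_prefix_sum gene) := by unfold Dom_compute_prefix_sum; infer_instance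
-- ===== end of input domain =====

-- B replaces A's per-index running-sum recurrence by collecting each character's occurrence
-- positions and concatenating constant segments filled with the occurrence rank; objective: alternative, same cost.


-- ===== PORT A =====
-- literal port of A: dict of zero-filled lists, outer loop over positions i, inner loop over
-- "ATCG", each cell set from the previous cell (guarded at i = 0) plus the indicator gene[i] == c.
-- i and gene[i] are always in range, so pyGetD/pySetD defaults never fire.
def compute_prefix_sum (gene : String) : List (String × List Int) :=
  let gs := gene.toList
  let n : Int := PySem.Str.len gene
  let init : PySem.Dict String (List Int) :=
    PySem.Dict.ofList ("ATCG".toList.map (fun c =>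
      (c.toString, (PySem.List.pyRange 0 n 1).map (fun _ => (0 : Int)))))
  let final := (PySem.List.pyRange 0 n 1).foldl (fun d i =>
    "ATCG".toList.foldl (fun d c =>
      d.modify c.toString [] (fun l =>
        PySem.List.pySetD l i
          ((if i - 1 ≥ 0 then PySem.List.pyGetD l (i - 1) 0 else 0) +
           (if PySem.List.pyGetD gs i ' ' == c then (1 : Int) else 0)))) d) init
  final.items

-- ===== PORT B =====
-- port of B's inner loop over `enumerate(positions)`: k is the enumerate counter, prev the
-- previous occurrence position; `[k] * (pos - prev)` is List.replicate with Python's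
-- negative-repeat-is-empty clamp (the count here is never negative).
def pvSegB (n : Int) : Int → Int → List Int → List Int
  | k, prev, [] => List.replicate (n - prev).toNat k
  | k, prev, pos :: rest => List.replicate (pos - prev).toNat k ++ pvSegB n (k + 1) pos rest

def compute_prefix_sum_alt (gene : String) : List (String × List Int) :=
  let gs := gene.toList
  let n : Int := PySem.Str.len gene
  ("ATCG".toList.foldl (fun res c =>
    let positions := (PySem.List.enumerate gs 0).filterMap
      (fun p => if p.2 == c then some p.1 else none)
    res.insert c.toString (pvSegB n 0 0 positions)) PySem.Dict.empty).items

-- ===== PRECONDITION & SPEC =====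
def Spec_compute_prefix_sum (gene : String) (out : List (String × List Int)) : Prop := out = compute_prefix_sum_alt gene
instance (gene : String) (out : List (String × List Int)) : Decidable (Spec_compute_prefix_sum gene out) := by unfold Spec_compute_prefix_sum; infer_instance

-- ===== CLAIM (what is proved, stated in full; the proofs are below) =====
def Claim_equal_compute_prefix_sum : Prop := ∀ (gene : String), Dom_compute_prefix_sum gene → Spec_compute_prefix_sum gene (compute_prefix_sum gene)

-- ===== LEMMAS AND PROOFS =====

-- proof-side helpers
def pvMkD (a t c g : List Int) : PySem.Dict String (List Int) :=
  PySem.Dict.ofList [("A", a), ("T", t), ("C", c), ("G", g)]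

-- reference running-count list: the common value both ports compute per character
def pvRunB (c : Char) (total : Int) : List Char → List Int
  | [] => []
  | g :: rest =>
    (total + (if g == c then 1 else 0)) :: pvRunB c (total + (if g == c then 1 else 0)) rest

-- occurrence positions of c in gs, numbered from j
def pvIdx (c : Char) (j : Int) : List Char → List Int
  | [] => []
  | g :: rest => if g == c then j :: pvIdx c (j + 1) rest else pvIdx c (j + 1) rest

-- the list held at key c after k positions of A's loop have been processed
def pvFill (c : Char) (gs : List Char) (k : Nat) : List Int :=
  pvRunB c 0 (gs.take k) ++ (gs.drop k).map (fun _ => (0 : Int))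

theorem pvRunB_length (c : Char) (t : Int) (xs : List Char) :
    (pvRunB c t xs).length = xs.length := by
  induction xs generalizing t with
  | nil => rfl
  | cons g rest ih => simp [pvRunB, ih]

theorem pvRunB_snoc (c : Char) (t : Int) (xs : List Char) (g : Char) :
    pvRunB c t (xs ++ [g]) =
      pvRunB c t xs ++ [t + (xs.countP (· == c) : Int) + (if g == c then 1 else 0)] := by
  induction xs generalizing t with
  | nil => simp [pvRunB]
  | cons x rest ih =>
    simp only [List.cons_append, pvRunB, ih, List.countP_cons]
    by_cases h : x == c <;> (simp [h]; try ring_nf)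

theorem pvRunB_getLast (c : Char) (xs : List Char) (h : xs ≠ []) :
    (pvRunB c 0 xs).getLast? = some ((xs.countP (· == c) : Int)) := by
  rcases xs.eq_nil_or_concat with rfl | ⟨ys, g, rfl⟩
  · exact absurd rfl h
  rw [List.concat_eq_append, pvRunB_snoc]
  simp [List.countP_append, List.countP_cons]

theorem pvSetAppendLen (as : List Int) (b : Int) (bs : List Int) (v : Int) :
    (as ++ b :: bs).set as.length v = as ++ v :: bs := by
  induction as with
  | nil => rfl
  | cons x xs ih => simp [ih]

set_option maxHeartbeats 2000000 in
theorem pvInnerStep (F : Char → List Int → List Int) (a t c g : List Int) :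
    "ATCG".toList.foldl (fun d ch => d.modify ch.toString [] (F ch)) (pvMkD a t c g)
      = pvMkD (F 'A' a) (F 'T' t) (F 'C' c) (F 'G' g) := rfl

theorem pvFillStep (gs : List Char) (c : Char) (k : Nat) (hk : k < gs.length) :
    PySem.List.pySetD (pvFill c gs k) (k : Int)
      ((if (k : Int) - 1 ≥ 0 then PySem.List.pyGetD (pvFill c gs k) ((k : Int) - 1) 0 else 0) +
       (if PySem.List.pyGetD gs (k : Int) ' ' == c then (1 : Int) else 0))
      = pvFill c gs (k + 1) := by
  have hgs : PySem.List.pyGetD gs (k : Int) ' ' = gs[k] := by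
    simp [PySem.List.pyGetD_natCast, List.getD_eq_getElem?_getD, hk]
  have hprev : (if (k : Int) - 1 ≥ 0 then PySem.List.pyGetD (pvFill c gs k) ((k : Int) - 1) 0 else 0)
      = ((gs.take k).countP (· == c) : Int) := by
    cases k with
    | zero => simp
    | succ k' =>
      have htl : (gs.take (k' + 1)).length = k' + 1 := by simp; omega
      have hxne : gs.take (k' + 1) ≠ [] := by intro h; rw [h] at htl; simp at htl
      have hlen : (pvRunB c 0 (gs.take (k' + 1))).length = k' + 1 := by
        rw [pvRunB_length, htl]
      have hlast := pvRunB_getLast c (gs.take (k' + 1)) hxne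
      have hge : (pvRunB c 0 (gs.take (k' + 1)))[k']? =
          some (((gs.take (k' + 1)).countP (· == c) : Int)) := by
        rw [← hlast, List.getLast?_eq_getElem?, hlen]
        norm_num
      have h1 : ((k' + 1 : Nat) : Int) - 1 = (k' : Int) := by push_cast; ring
      rw [if_pos (by push_cast; omega), h1, PySem.List.pyGetD_natCast,
        List.getD_eq_getElem?_getD]
      unfold pvFill
      rw [List.getElem?_append_left (by omega), hge]
      rfl
  rw [hprev, hgs, PySem.List.pySetD_natCast]
  have hdrop : gs.drop k = gs[k] :: gs.drop (k + 1) := (List.getElem_cons_drop hk).symm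
  have hlenr : (pvRunB c 0 (gs.take k)).length = k := by
    rw [pvRunB_length]; simp [Nat.le_of_lt hk]
  have htake : gs.take (k + 1) = gs.take k ++ [gs[k]] := by
    rw [List.take_add_one, List.getElem?_eq_getElem hk]; rfl
  calc (pvFill c gs k).set k (((gs.take k).countP (· == c) : Int) + (if gs[k] == c then 1 else 0))
      = (pvRunB c 0 (gs.take k) ++ (0 : Int) :: (gs.drop (k+1)).map (fun _ => (0:Int))).set
          (pvRunB c 0 (gs.take k)).length
          (((gs.take k).countP (· == c) : Int) + (if gs[k] == c then 1 else 0)) := by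
        unfold pvFill
        rw [hdrop, hlenr, List.map_cons]
    _ = pvFill c gs (k + 1) := by
        rw [pvSetAppendLen]
        unfold pvFill
        rw [htake, pvRunB_snoc]
        simp

theorem pvZeros (gs : List Char) :
    (PySem.List.pyRange 0 (gs.length : Int) 1).map (fun _ => (0 : Int)) =
      gs.map (fun _ => (0 : Int)) := by
  rw [PySem.List.pyRange_one]
  simp [Function.comp_def, List.map_const']

theorem pvFill_zero (c : Char) (gs : List Char) :
    pvFill c gs 0 = gs.map (fun _ => (0 : Int)) := by
  simp [pvFill, pvRunB]

theorem pvLoop (gs : List Char) (k : Nat) (hk : k ≤ gs.length) :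
    (PySem.List.pyRange (k : Int) (gs.length : Int) 1).foldl
      (fun d i => "ATCG".toList.foldl (fun d ch =>
        d.modify ch.toString [] (fun l =>
          PySem.List.pySetD l i
            ((if i - 1 ≥ 0 then PySem.List.pyGetD l (i - 1) 0 else 0) +
             (if PySem.List.pyGetD gs i ' ' == ch then (1 : Int) else 0)))) d)
      (pvMkD (pvFill 'A' gs k) (pvFill 'T' gs k) (pvFill 'C' gs k) (pvFill 'G' gs k))
    = pvMkD (pvRunB 'A' 0 gs) (pvRunB 'T' 0 gs) (pvRunB 'C' 0 gs) (pvRunB 'G' 0 gs) := by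
  obtain ⟨m, hm⟩ : ∃ m, gs.length - k = m := ⟨_, rfl⟩
  induction m generalizing k with
  | zero =>
    have hke : k = gs.length := by omega
    subst hke
    rw [PySem.List.pyRange_one_eq_nil (le_refl _), List.foldl_nil]
    simp [pvFill]
  | succ m ih =>
    have hklt : k < gs.length := by omega
    rw [PySem.List.pyRange_one_cons (by exact_mod_cast hklt), List.foldl_cons,
      pvInnerStep (fun ch l =>
        PySem.List.pySetD l (k : Int)
          ((if (k : Int) - 1 ≥ 0 then PySem.List.pyGetD l ((k : Int) - 1) 0 else 0) +
           (if PySem.List.pyGetD gs (k : Int) ' ' == ch then (1 : Int) else 0))),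
      pvFillStep gs 'A' k hklt, pvFillStep gs 'T' k hklt,
      pvFillStep gs 'C' k hklt, pvFillStep gs 'G' k hklt]
    have hcast : (k : Int) + 1 = ((k + 1 : Nat) : Int) := by push_cast; ring
    rw [hcast]
    exact ih (k + 1) (by omega) (by omega)

-- A's result equals the pvRunB reference lists
theorem pvA_eq (gene : String) :
    compute_prefix_sum gene =
      (pvMkD (pvRunB 'A' 0 gene.toList) (pvRunB 'T' 0 gene.toList)
        (pvRunB 'C' 0 gene.toList) (pvRunB 'G' 0 gene.toList)).items := by
  unfold compute_prefix_sum
  have hlen : PySem.Str.len gene = (gene.toList.length : Int) := by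
    simp [PySem.Str.len_eq]
  dsimp only
  rw [hlen, pvZeros]
  have hinit : PySem.Dict.ofList ("ATCG".toList.map (fun c =>
      (c.toString, gene.toList.map (fun _ => (0 : Int))))) =
      pvMkD (gene.toList.map (fun _ => (0 : Int))) (gene.toList.map (fun _ => (0 : Int)))
        (gene.toList.map (fun _ => (0 : Int))) (gene.toList.map (fun _ => (0 : Int))) := rfl
  rw [hinit]
  have hL := pvLoop gene.toList 0 (Nat.zero_le _)
  simp only [pvFill_zero, Nat.cast_zero] at hL
  rw [hL]

-- B side: the enumerate/filterMap comprehension is pvIdx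
theorem pvIdx_filterMap (c : Char) (gs : List Char) (j : Int) :
    (PySem.List.enumerate gs j).filterMap
      (fun p => if p.2 == c then some p.1 else none) = pvIdx c j gs := by
  induction gs generalizing j with
  | nil => simp [PySem.List.enumerate_nil, pvIdx]
  | cons g rest ih =>
    rw [PySem.List.enumerate_cons, List.filterMap_cons, ih]
    by_cases h : g == c <;> simp [pvIdx, h]

-- the segment build over the occurrence positions is the running-count list
theorem pvSeg_run (c : Char) (gs : List Char) (j k n : Int) (d : Nat)
    (h : n = j + d + gs.length) :
    pvSegB n k j (pvIdx c (j + d) gs) = List.replicate d k ++ pvRunB c k gs := by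
  induction gs generalizing j k d with
  | nil =>
    simp only [pvIdx, pvSegB, pvRunB, List.append_nil]
    congr 1
    simp at h
    omega
  | cons g rest ih =>
    by_cases hg : g == c
    · simp only [pvIdx, hg, if_pos, pvSegB]
      have h1 : n = (j + d) + (1 : Nat) + rest.length := by
        simp at h ⊢; omega
      have := ih (j + d) (k + 1) 1 (by simpa using h1)
      rw [show (j + d) + ((1 : Nat) : Int) = j + d + 1 by push_cast; ring] at this
      rw [this, show ((j + d) - j).toNat = d by omega]
      simp [pvRunB, hg]
    · simp only [pvIdx, hg, if_neg, Bool.not_eq_true]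
      have h1 : n = j + ((d + 1 : Nat) : Int) + rest.length := by
        simp at h ⊢; omega
      have := ih j k (d + 1) h1
      rw [show j + ((d + 1 : Nat) : Int) = j + d + 1 by push_cast; ring] at this
      rw [this, List.replicate_succ', List.append_assoc]
      simp [pvRunB, hg]

theorem pvB_eq (gene : String) :
    compute_prefix_sum_alt gene =
      (pvMkD (pvRunB 'A' 0 gene.toList) (pvRunB 'T' 0 gene.toList)
        (pvRunB 'C' 0 gene.toList) (pvRunB 'G' 0 gene.toList)).items := by
  unfold compute_prefix_sum_alt
  have hlen : PySem.Str.len gene = (gene.toList.length : Int) := by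
    simp [PySem.Str.len_eq]
  dsimp only
  rw [hlen]
  have hrun : ∀ c : Char,
      pvSegB (gene.toList.length : Int) 0 0 ((PySem.List.enumerate gene.toList 0).filterMap
        (fun p => if p.2 == c then some p.1 else none)) = pvRunB c 0 gene.toList := by
    intro c
    rw [pvIdx_filterMap]
    have := pvSeg_run c gene.toList 0 0 (gene.toList.length : Int) 0 (by simp)
    simpa using this
  simp only [show "ATCG".toList = ['A','T','C','G'] from rfl, List.foldl_cons, List.foldl_nil]
  rw [hrun 'A', hrun 'T', hrun 'C', hrun 'G']
  rfl

-- ===== VERDICT =====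
theorem compute_prefix_sum_spec : Claim_equal_compute_prefix_sum := by
  intro gene _
  unfold Spec_compute_prefix_sum
  rw [pvA_eq, pvB_eq]
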